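-- pv_equiv track=rewrite | github.com/shivangdubey/HacktoberFest2020 | LeetCode/Python/split_a_string_in_a_balanced_string.py | balancedStringSplit_easy
-- ===== SOURCE A (Python) =====
-- def balancedStringSplit_easy(s: str) -> int:
--         balancedCount = count = 0
--         for char in s:
--             if char == 'L':
--                 count += 1
--             elif char == 'R':
--                 count -= 1
--             if count == 0:
--                 balancedCount += 1
--         return balancedCount
-- ===== SOURCE B (Python) =====
-- def balancedStringSplit_easy(s: str) -> int:
--     # A prefix of s is a split point exactly when it holds equally many
--     # 'L' and 'R'; count those prefixes directly with str.count.
--     return sum(1 for i in range(1, len(s) + 1)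
--                if s[:i].count('L') == s[:i].count('R'))
-- ===== Notes on version B (the rewrite author's own statement) =====
-- stated objective: alternative
-- what changed: Replaces A's single stateful pass (a running counter tested for zero at each step) by a staged per-prefix formulation: for every prefix length i it recounts the two letter kinds in s[:i] with str.count and tallies the prefixes where the two counts are equal; this trades A's O(n) scan for an O(n^2) but stateless nested-pass algorithm.
import Mathlib
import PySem

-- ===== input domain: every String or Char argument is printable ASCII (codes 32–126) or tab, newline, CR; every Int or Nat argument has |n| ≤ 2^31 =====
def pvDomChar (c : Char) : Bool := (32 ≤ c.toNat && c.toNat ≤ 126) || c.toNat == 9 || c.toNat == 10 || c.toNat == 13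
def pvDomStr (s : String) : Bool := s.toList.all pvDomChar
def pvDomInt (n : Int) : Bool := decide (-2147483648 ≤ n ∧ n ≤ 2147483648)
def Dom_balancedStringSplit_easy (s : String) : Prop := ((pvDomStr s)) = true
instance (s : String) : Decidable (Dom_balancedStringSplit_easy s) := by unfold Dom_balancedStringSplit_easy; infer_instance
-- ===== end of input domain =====

-- B replaces A's single stateful pass by a staged per-prefix recount: for each prefix length i it compares the counts of the two letter kinds in s[:i]; a different (quadratic, stateless) algorithm, no speed claim.

-- ===== PORT A =====
-- one loop step of A: update `count` via the chained ifs, then bump balancedCount when count == 0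
def pvStepA (st : Int × Int) (c : Char) : Int × Int :=
  let count := if c = 'L' then st.2 + 1 else if c = 'R' then st.2 - 1 else st.2
  (if count = 0 then st.1 + 1 else st.1, count)

def balancedStringSplit_easy (s : String) : Int :=
  (s.toList.foldl pvStepA (0, 0)).1

-- ===== PORT B =====
-- sum(1 for i in range(1, len(s)+1) if s[:i].count('L') == s[:i].count('R'))
-- s[:i] with 0 ≤ i is PySem.List.slice none (some i); str.count of a single char is List.count (exact here)
def balancedStringSplit_easy_alt (s : String) : Int :=
  ((PySem.List.pyRange 1 ((s.toList.length : Int) + 1) 1).countP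
    (fun i =>
      (PySem.List.slice s.toList none (some i)).count 'L'
        == (PySem.List.slice s.toList none (some i)).count 'R') : Int)

-- ===== PRECONDITION & SPEC =====
def Spec_balancedStringSplit_easy (s : String) (out : Int) : Prop := out = balancedStringSplit_easy_alt s
instance (s : String) (out : Int) : Decidable (Spec_balancedStringSplit_easy s out) := by unfold Spec_balancedStringSplit_easy; infer_instance

-- ===== CLAIM =====
def Claim_equal_balancedStringSplit_easy : Prop := ∀ (s : String), Dom_balancedStringSplit_easy s → Spec_balancedStringSplit_easy s (balancedStringSplit_easy s)

-- ===== LEMMAS AND PROOFS =====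

def pvDelta (c : Char) : Int := if c = 'L' then 1 else if c = 'R' then -1 else 0

-- the L-minus-R balance of a list
def pvBal (l : List Char) : Int := (l.count 'L' : Int) - (l.count 'R' : Int)

-- common reference: walk the list with a running offset, counting zero totals
def pvSpecF (cnt : Int) : List Char → Nat
  | [] => 0
  | c :: t => (if cnt + pvDelta c = 0 then 1 else 0) + pvSpecF (cnt + pvDelta c) t

theorem pv_stepA_eq (bc cnt : Int) (c : Char) :
    pvStepA (bc, cnt) c = (if cnt + pvDelta c = 0 then bc + 1 else bc, cnt + pvDelta c) := by
  simp only [pvStepA, pvDelta]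
  split_ifs <;> simp_all <;> omega

-- A's fold computes bc + pvSpecF cnt l
theorem pv_A_fold (l : List Char) : ∀ (bc cnt : Int),
    (l.foldl pvStepA (bc, cnt)).1 = bc + (pvSpecF cnt l : Int) := by
  induction l with
  | nil => intro bc cnt; simp [pvSpecF]
  | cons c t ih =>
    intro bc cnt
    rw [List.foldl_cons, pv_stepA_eq, ih, pvSpecF]
    by_cases h : cnt + pvDelta c = 0 <;> simp [h] <;> omega

theorem pv_bal_cons (c : Char) (t : List Char) :
    pvBal (c :: t) = pvDelta c + pvBal t := by
  simp only [pvBal, pvDelta, List.count_cons]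
  by_cases hL : c = 'L' <;> by_cases hR : c = 'R' <;> simp_all [beq_iff_eq] <;> omega

-- B's per-prefix zero-balance count, over k < l.length testing take (k+1), equals pvSpecF
theorem pv_B_count (l : List Char) : ∀ (cnt : Int),
    (List.range l.length).countP (fun k => decide (cnt + pvBal (l.take (k + 1)) = 0))
      = pvSpecF cnt l := by
  induction l with
  | nil => intro cnt; simp [pvSpecF]
  | cons c t ih =>
    intro cnt
    rw [List.length_cons, List.range_succ_eq_map, List.countP_cons, List.countP_map]
    have h1 : ((fun k => decide (cnt + pvBal ((c :: t).take (k + 1)) = 0)) ∘ Nat.succ)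
        = fun k => decide ((cnt + pvDelta c) + pvBal (t.take (k + 1)) = 0) := by
      funext k
      simp only [Function.comp, List.take_succ_cons, pv_bal_cons]
      rw [Bool.eq_iff_iff]
      simp only [decide_eq_true_eq]
      omega
    have h0 : pvBal ((c :: t).take (0 + 1)) = pvDelta c := by
      rw [show (c :: t).take (0 + 1) = [c] from rfl, pv_bal_cons]
      simp [pvBal]
    rw [h1, ih (cnt + pvDelta c), h0, pvSpecF]
    by_cases h : cnt + pvDelta c = 0 <;> simp [h] <;> omega

-- rewrite B's port into the range/take form
theorem pv_B_eq (s : String) :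
    balancedStringSplit_easy_alt s
      = ((List.range s.toList.length).countP
          (fun k => decide (0 + pvBal (s.toList.take (k + 1)) = 0)) : Int) := by
  unfold balancedStringSplit_easy_alt
  rw [PySem.List.pyRange_one]
  congr 1
  have hn : (((s.toList.length : Int) + 1) - 1).toNat = s.toList.length := by omega
  rw [hn, List.countP_map]
  apply List.countP_congr
  intro k hk
  have hcast : (1 : Int) + (k : Int) = ((k + 1 : Nat) : Int) := by push_cast; ring
  simp only [Function.comp, hcast, PySem.List.slice_to_natCast]
  rw [Bool.eq_iff_iff]
  simp only [beq_iff_eq, decide_eq_true_eq, iff_true, pvBal]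
  omega

-- ===== VERDICT =====
theorem balancedStringSplit_easy_spec : Claim_equal_balancedStringSplit_easy := by
  intro s _
  unfold Spec_balancedStringSplit_easy balancedStringSplit_easy
  rw [pv_A_fold, pv_B_eq, pv_B_count]
  simp
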